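-- pv_equiv track=rewrite | github.com/nirmalnishant645/Python-Programming | Competitive-Programming/Even-Pairs.py | EvenPairs
-- ===== SOURCE A (Python) =====
-- def EvenPairs(strParam):
--   for i in range(len(strParam)):
--     count = 0
--     num = ''
--     while i < len(strParam) and '0' <= strParam[i] <= '9':
--       num += strParam[i]
--       temp = int(num)
--       if not temp % 2:
--         num = ''
--         count += 1
--       i += 1
--     if count >= 2:
--       return True
--   return False
-- ===== SOURCE B (Python) =====
-- def EvenPairs(strParam):
--   count = 0
--   for ch in strParam:
--     if '0' <= ch <= '9':
--       if (ord(ch) - ord('0')) % 2 == 0: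
--         count += 1
--         if count >= 2:
--           return True
--     else:
--       count = 0
--   return False
-- ===== Notes on version B (the rewrite author's own statement) =====
-- stated objective: faster
-- what changed: Replaced the nested restart-at-every-index scan with repeated int() reparsing of the accumulated digit string by a single left-to-right pass that counts even digits in the current digit run (reset on non-digit) and returns True as soon as the count reaches 2.
import Mathlib
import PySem

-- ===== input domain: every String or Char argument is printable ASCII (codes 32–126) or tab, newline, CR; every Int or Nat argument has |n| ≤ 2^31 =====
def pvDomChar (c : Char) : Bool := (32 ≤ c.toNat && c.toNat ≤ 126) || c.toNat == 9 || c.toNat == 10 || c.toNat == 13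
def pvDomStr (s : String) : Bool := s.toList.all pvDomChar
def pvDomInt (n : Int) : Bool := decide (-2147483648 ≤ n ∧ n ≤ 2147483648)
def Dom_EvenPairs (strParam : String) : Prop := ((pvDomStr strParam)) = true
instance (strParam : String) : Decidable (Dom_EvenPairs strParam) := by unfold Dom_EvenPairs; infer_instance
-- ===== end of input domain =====

-- B replaces A's quadratic restart-at-every-index scan (which also reparses the
-- accumulated digit string with int() at each step) by one linear pass that counts
-- even digits per digit run and exits at 2.

-- ===== PORT A =====
-- int(num) where num is always a NONEMPTY string of ASCII digits '0'..'9' (as in A: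
-- num only ever accumulates characters that passed the '0' <= c <= '9' guard);
-- ported by hand as the decimal value — exact for int() on such strings, and used
-- only on them (PySem.Int.ofStr? is opaque to mod-2 reasoning here).
def pyIntDigits (ds : List Char) : Int :=
  ds.foldl (fun a c => 10 * a + ((c.toNat : Int) - ('0'.toNat : Int))) 0

-- the inner `while i < len(strParam) and '0' <= strParam[i] <= '9'` loop of A;
-- state = (i, num, count); returns the final count
def EvenPairsInner (cs : List Char) (i : Nat) (num : List Char) (count : Nat) : Nat :=
  if h : i < cs.length ∧ '0' ≤ cs.getD i ' ' ∧ cs.getD i ' ' ≤ '9' then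
    let num' := num ++ [cs.getD i ' ']
    let temp := pyIntDigits num'
    if PySem.Int.mod temp 2 = 0 then EvenPairsInner cs (i + 1) [] (count + 1)
    else EvenPairsInner cs (i + 1) num' count
  else count
termination_by cs.length - i
decreasing_by all_goals (obtain ⟨h1, -⟩ := h; omega)

-- the outer `for i in range(len(strParam))` loop with its early `return True`
def EvenPairsOuter (cs : List Char) : List Nat → Bool
  | [] => false
  | i :: rest =>
    if 2 ≤ EvenPairsInner cs i [] 0 then true else EvenPairsOuter cs rest

def EvenPairs (strParam : String) : Bool :=
  EvenPairsOuter strParam.toList (List.range strParam.toList.length)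

-- ===== PORT B =====
-- Source B's single pass: count = evens in the current digit run, reset on non-digit,
-- early `return True` when count reaches 2
def EvenPairsLoop : List Char → Nat → Bool
  | [], _ => false
  | ch :: rest, count =>
    if '0' ≤ ch ∧ ch ≤ '9' then
      if PySem.Int.mod ((ch.toNat : Int) - ('0'.toNat : Int)) 2 = 0 then
        if 2 ≤ count + 1 then true else EvenPairsLoop rest (count + 1)
      else EvenPairsLoop rest count
    else EvenPairsLoop rest 0

def EvenPairs_alt (strParam : String) : Bool :=
  EvenPairsLoop strParam.toList 0

-- ===== PRECONDITION & SPEC =====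
def Spec_EvenPairs (strParam : String) (out : Bool) : Prop := out = EvenPairs_alt strParam
instance (strParam : String) (out : Bool) : Decidable (Spec_EvenPairs strParam out) := by unfold Spec_EvenPairs; infer_instance

-- ===== CLAIM (what is proved, stated in full; the proofs are below) =====
def Claim_equal_EvenPairs : Prop := ∀ (strParam : String), Dom_EvenPairs strParam → Spec_EvenPairs strParam (EvenPairs strParam)

-- ===== LEMMAS AND PROOFS =====

-- the digit run starting at position i, and the count of even digits in a list
def runAt (cs : List Char) (i : Nat) : List Char :=
  (cs.drop i).takeWhile (fun c => decide ('0' ≤ c ∧ c ≤ '9'))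

def countE (ds : List Char) : Nat :=
  ds.countP (fun c => decide (c.toNat % 2 = 0))

lemma runAt_ge_length (cs : List Char) (i : Nat) (h : cs.length ≤ i) : runAt cs i = [] := by
  simp [runAt, List.drop_eq_nil_of_le h]

lemma runAt_cons (cs : List Char) (i : Nat) (h : i < cs.length)
    (hd : '0' ≤ cs[i] ∧ cs[i] ≤ '9') :
    runAt cs i = cs[i] :: runAt cs (i + 1) := by
  unfold runAt
  conv_lhs => rw [← List.getElem_cons_drop h]; rw [List.takeWhile_cons]
  rw [if_pos (by simp [hd.1, hd.2])]

lemma runAt_stop (cs : List Char) (i : Nat) (h : i < cs.length)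
    (hd : ¬ ('0' ≤ cs[i] ∧ cs[i] ≤ '9')) : runAt cs i = [] := by
  unfold runAt
  conv_lhs => rw [← List.getElem_cons_drop h]; rw [List.takeWhile_cons]
  rw [if_neg (by simpa using hd)]

-- parity of the hand-ported int(): appending a digit c makes the value's parity that of c
lemma pyIntDigits_parity (num : List Char) (c : Char) :
    (PySem.Int.mod (pyIntDigits (num ++ [c])) 2 = 0) ↔ c.toNat % 2 = 0 := by
  rw [PySem.Int.mod_eq_emod_of_pos (by norm_num : (0 : Int) < 2)]
  unfold pyIntDigits
  rw [List.foldl_append]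
  simp only [List.foldl_cons, List.foldl_nil]
  have h48 : '0'.toNat = 48 := rfl
  rw [h48]
  omega

-- A's inner while loop computes count + (number of even digits in the run starting at i),
-- independently of the accumulated num
lemma inner_eq (n : Nat) : ∀ (cs : List Char) (i : Nat), cs.length - i ≤ n →
    ∀ (num : List Char) (count : Nat),
    EvenPairsInner cs i num count = count + countE (runAt cs i) := by
  induction n with
  | zero =>
    intro cs i hn num count
    have hge : cs.length ≤ i := by omega
    rw [EvenPairsInner, runAt_ge_length cs i hge]
    have hneg : ¬ (i < cs.length ∧ '0' ≤ cs.getD i ' ' ∧ cs.getD i ' ' ≤ '9') := by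
      intro h; omega
    rw [dif_neg hneg]
    simp [countE]
  | succ n ih =>
    intro cs i hn num count
    rw [EvenPairsInner]
    by_cases h : i < cs.length ∧ '0' ≤ cs.getD i ' ' ∧ cs.getD i ' ' ≤ '9'
    · have hi : i < cs.length := h.1
      have hget : cs.getD i ' ' = cs[i] := List.getD_eq_getElem cs ' ' hi
      have hdig : '0' ≤ cs[i] ∧ cs[i] ≤ '9' := by rw [← hget]; exact ⟨h.2.1, h.2.2⟩
      rw [dif_pos h]
      have hrec : cs.length - (i + 1) ≤ n := by omega
      have hrun := runAt_cons cs i hi hdig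
      by_cases hev : PySem.Int.mod (pyIntDigits (num ++ [cs.getD i ' '])) 2 = 0
      · rw [if_pos hev, ih cs (i + 1) hrec [] (count + 1), hrun]
        have : cs[i].toNat % 2 = 0 := by
          rw [hget] at hev; exact (pyIntDigits_parity num cs[i]).mp hev
        simp [countE, this]
        omega
      · rw [if_neg hev, ih cs (i + 1) hrec _ count, hrun]
        have : ¬ cs[i].toNat % 2 = 0 := by
          intro hc
          exact hev (by rw [hget]; exact (pyIntDigits_parity num cs[i]).mpr hc)
        simp [countE, this]
    · rw [dif_neg h]
      by_cases hi : i < cs.length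
      · have hget : cs.getD i ' ' = cs[i] := List.getD_eq_getElem cs ' ' hi
        have hd : ¬ ('0' ≤ cs[i] ∧ cs[i] ≤ '9') := by
          intro hc; exact h ⟨hi, by rw [hget]; exact hc.1, by rw [hget]; exact hc.2⟩
        rw [runAt_stop cs i hi hd]
        simp [countE]
      · rw [runAt_ge_length cs i (by omega)]
        simp [countE]

lemma inner_eq' (cs : List Char) (i : Nat) (num : List Char) (count : Nat) :
    EvenPairsInner cs i num count = count + countE (runAt cs i) :=
  inner_eq (cs.length - i) cs i le_rfl num count

-- A returns true iff some position starts a digit run (suffix) with ≥ 2 even digits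
lemma outer_any (cs : List Char) (l : List Nat) :
    EvenPairsOuter cs l = true ↔ ∃ i ∈ l, 2 ≤ countE (runAt cs i) := by
  induction l with
  | nil => simp [EvenPairsOuter]
  | cons j rest ih =>
    rw [EvenPairsOuter]
    by_cases h : 2 ≤ EvenPairsInner cs j [] 0
    · rw [if_pos h]
      rw [inner_eq'] at h
      constructor
      · intro _; exact ⟨j, by simp, by omega⟩
      · intro _; rfl
    · rw [if_neg h, ih]
      rw [inner_eq'] at h
      constructor
      · rintro ⟨i, hi, h2⟩; exact ⟨i, by simp [hi], h2⟩
      · rintro ⟨i, hi, h2⟩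
        rcases List.mem_cons.mp hi with rfl | hmem
        · omega
        · exact ⟨i, hmem, h2⟩

-- B's loop characterisation (count < 2 in every reachable state)
lemma loop_iff : ∀ (cs : List Char) (count : Nat), count < 2 →
    (EvenPairsLoop cs count = true ↔
      2 ≤ count + countE (runAt cs 0) ∨ ∃ i < cs.length, 2 ≤ countE (runAt cs (i + 1))) := by
  intro cs
  induction cs with
  | nil =>
    intro count hc
    simp [EvenPairsLoop, runAt, countE]
    omega
  | cons c rest ih =>
    intro count hc
    have hrun0 : runAt (c :: rest) 0 = (c :: rest).takeWhile (fun x => decide ('0' ≤ x ∧ x ≤ '9')) := by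
      simp [runAt]
    have hshift : ∀ j : Nat, runAt (c :: rest) (j + 1) = runAt rest j := by
      intro j; simp [runAt]
    have hend : runAt rest rest.length = [] := runAt_ge_length rest rest.length le_rfl
    rw [EvenPairsLoop]
    by_cases hd : '0' ≤ c ∧ c ≤ '9'
    · rw [if_pos hd]
      have hrc : runAt (c :: rest) 0 = c :: runAt rest 0 := by
        rw [hrun0]; simp [hd.1, hd.2, runAt]
      by_cases hev : PySem.Int.mod ((c.toNat : Int) - ('0'.toNat : Int)) 2 = 0
      · -- even digit
        have hpar : c.toNat % 2 = 0 := by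
          rw [PySem.Int.mod_eq_emod_of_pos (by norm_num : (0 : Int) < 2)] at hev
          have h48 : '0'.toNat = 48 := rfl
          rw [h48] at hev; omega
        have hcE : countE (runAt (c :: rest) 0) = 1 + countE (runAt rest 0) := by
          rw [hrc]; simp [countE, hpar]; omega
        rw [if_pos hev]
        by_cases h1 : 2 ≤ count + 1
        · rw [if_pos h1]
          constructor
          · intro _; left; rw [hcE]; omega
          · intro _; rfl
        · rw [if_neg h1]
          have hcount : count = 0 := by omega
          subst hcount
          rw [ih 1 (by omega)]
          rw [hcE]
          constructor
          · rintro (h2 | ⟨i, hi, h2⟩)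
            · left; omega
            · right; exact ⟨i + 1, by simp; omega, by rw [hshift]; exact h2⟩
          · rintro (h2 | ⟨i, hi, h2⟩)
            · left; omega
            · rcases Nat.eq_zero_or_pos i with rfl | hpos
              · left; rw [hshift] at h2; omega
              · obtain ⟨j, rfl⟩ : ∃ j, i = j + 1 := ⟨i - 1, by omega⟩
                rw [hshift] at h2
                rcases Nat.lt_or_ge (j + 1) rest.length with hlt | hge
                · right; exact ⟨j, by omega, h2⟩
                · rw [runAt_ge_length rest (j + 1) (by omega)] at h2
                  simp [countE] at h2
      · -- odd digit
        rw [if_neg hev]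
        have hpar : ¬ c.toNat % 2 = 0 := by
          intro hp
          apply hev
          rw [PySem.Int.mod_eq_emod_of_pos (by norm_num : (0 : Int) < 2)]
          have h48 : '0'.toNat = 48 := rfl
          rw [h48]; omega
        have hcE : countE (runAt (c :: rest) 0) = countE (runAt rest 0) := by
          rw [hrc]; simp [countE, hpar]
        rw [ih count hc, hcE]
        constructor
        · rintro (h2 | ⟨i, hi, h2⟩)
          · left; exact h2
          · right; exact ⟨i + 1, by simp; omega, by rw [hshift]; exact h2⟩
        · rintro (h2 | ⟨i, hi, h2⟩)
          · left; exact h2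
          · rcases Nat.eq_zero_or_pos i with rfl | hpos
            · left; rw [hshift] at h2; omega
            · obtain ⟨j, rfl⟩ : ∃ j, i = j + 1 := ⟨i - 1, by omega⟩
              rw [hshift] at h2
              rcases Nat.lt_or_ge (j + 1) rest.length with hlt | hge
              · right; exact ⟨j, by omega, h2⟩
              · rw [runAt_ge_length rest (j + 1) (by omega)] at h2
                simp [countE] at h2
    · -- not a digit: count resets
      rw [if_neg hd]
      have hr0 : runAt (c :: rest) 0 = [] := by
        rw [hrun0]; simp [hd]
      rw [ih 0 (by omega), hr0]
      have h0 : ¬ 2 ≤ count + countE ([] : List Char) := by simp [countE]; omega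
      constructor
      · rintro (h2 | ⟨i, hi, h2⟩)
        · right
          rcases Nat.eq_zero_or_pos rest.length with hlen | hlen
          · rw [runAt_ge_length rest 0 (by omega)] at h2
            simp [countE] at h2
          · exact ⟨0, by simp, by rw [hshift]; omega⟩
        · right; exact ⟨i + 1, by simp; omega, by rw [hshift]; exact h2⟩
      · rintro (h2 | ⟨i, hi, h2⟩)
        · exact absurd h2 h0
        · rcases Nat.eq_zero_or_pos i with rfl | hpos
          · left; rw [hshift] at h2; omega
          · obtain ⟨j, rfl⟩ : ∃ j, i = j + 1 := ⟨i - 1, by omega⟩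
            rw [hshift] at h2
            rcases Nat.lt_or_ge (j + 1) rest.length with hlt | hge
            · right; exact ⟨j, by omega, h2⟩
            · rw [runAt_ge_length rest (j + 1) (by omega)] at h2
              simp [countE] at h2

-- ===== VERDICT (by name: the statement is the Claim_ definition above) =====
theorem EvenPairs_spec : Claim_equal_EvenPairs := by
  intro strParam _
  unfold Spec_EvenPairs EvenPairs EvenPairs_alt
  set cs := strParam.toList with hcs
  rw [Bool.eq_iff_iff, outer_any, loop_iff cs 0 (by omega)]
  constructor
  · rintro ⟨i, hi, h2⟩
    rw [List.mem_range] at hi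
    rcases Nat.eq_zero_or_pos i with rfl | hpos
    · left; simpa using h2
    · obtain ⟨j, rfl⟩ := Nat.exists_eq_add_of_lt hpos
      right; exact ⟨j, by omega, by simpa using h2⟩
  · rintro (h2 | ⟨i, hi, h2⟩)
    · have hlen : 0 < cs.length := by
        by_contra hl
        rw [runAt_ge_length cs 0 (by omega)] at h2
        simp [countE] at h2
      exact ⟨0, List.mem_range.mpr hlen, by omega⟩
    · rcases Nat.lt_or_ge (i + 1) cs.length with hlt | hge
      · exact ⟨i + 1, List.mem_range.mpr hlt, h2⟩
      · rw [runAt_ge_length cs (i + 1) hge] at h2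
        simp [countE] at h2
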